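-- pv_equiv track=rewrite | github.com/jordanvieira/Python | Analise de Algoritimos/Custo de Matrizes/menorCusto(N)Matrizes.py | Parenteses
-- ===== SOURCE A (Python) =====
-- def f(i, j):
--     return str(i)+','+str(j)
--
-- def Parenteses(s, i, j):
--     res = ''
--     if i == j:
--         return "M"+str(j)
--     else:
--         res += "("
--         res += Parenteses(s, i, s[f(i, j)])
--         res += Parenteses(s, s[f(i, j)]+1, j)
--         res += ")"
--         return res
-- ===== SOURCE B (Python) =====
-- def f(i, j):
--     return str(i)+','+str(j)
--
-- def Parenteses(s, i, j):
--     # Iterative: explicit LIFO work stack of tokens/ranges instead of recursion.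
--     res = ''
--     stack = [(i, j)]
--     while stack:
--         item = stack.pop()
--         if isinstance(item, str):
--             res += item
--         else:
--             a, b = item
--             if a == b:
--                 res += "M" + str(b)
--             else:
--                 k = s[f(a, b)]
--                 stack.extend([")", (k + 1, b), (a, k), "("])
--     return res
-- ===== Notes on version B (the rewrite author's own statement) =====
-- stated objective: alternative
-- what changed: Replaces the recursive tree reconstruction with an iterative loop over an explicit LIFO work stack of tokens and index ranges.
import Mathlib
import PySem

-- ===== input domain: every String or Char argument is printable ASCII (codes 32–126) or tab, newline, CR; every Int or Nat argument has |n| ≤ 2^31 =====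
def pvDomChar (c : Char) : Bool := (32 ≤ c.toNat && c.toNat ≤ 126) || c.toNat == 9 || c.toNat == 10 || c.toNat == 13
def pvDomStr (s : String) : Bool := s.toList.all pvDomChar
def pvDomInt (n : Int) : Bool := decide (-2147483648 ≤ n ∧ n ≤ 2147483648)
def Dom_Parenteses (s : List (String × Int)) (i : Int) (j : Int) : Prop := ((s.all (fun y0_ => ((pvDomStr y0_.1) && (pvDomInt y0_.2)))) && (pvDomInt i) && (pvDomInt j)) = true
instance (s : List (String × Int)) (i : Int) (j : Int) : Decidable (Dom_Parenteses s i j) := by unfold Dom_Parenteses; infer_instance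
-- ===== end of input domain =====

-- B replaces A's recursion by an iterative loop over an explicit LIFO work stack (alternative decomposition, same cost).


-- ===== PORT A =====
-- helper f: str(i)+','+str(j)
def fKey (i j : Int) : String := PySem.Int.toStr i ++ "," ++ PySem.Int.toStr j

-- dict lookup: first match in the association list
def sGet (s : List (String × Int)) (k : String) : Option Int :=
  (s.find? (fun p => p.1 == k)).map (·.2)

-- Literal port of A's recursion. Python raises KeyError on a missing key and recurses
-- unboundedly when a stored split leaves [i,j); exactly those inputs are excluded by
-- Pre_ below — there the port returns "" (the guard only totalizes the recursion, it
-- is never reached inside Pre_).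
def Parenteses (s : List (String × Int)) (i : Int) (j : Int) : String :=
  if i == j then "M" ++ PySem.Int.toStr j
  else
    match sGet s (fKey i j) with
    | none => ""          -- KeyError in Python; outside Pre_
    | some k =>
      if _h : i ≤ k ∧ k < j then
        "(" ++ Parenteses s i k ++ Parenteses s (k + 1) j ++ ")"
      else ""             -- non-terminating recursion in Python; outside Pre_
termination_by (j - i).toNat
decreasing_by all_goals omega

-- ===== PORT B =====
-- work item: either a literal string token or an index range (a, b); measure for termination
def itemM : Sum String (Int × Int) → Nat
  | .inl _ => 1
  | .inr (a, b) => 4 * (b - a).toNat + 1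

def stackM (st : List (Sum String (Int × Int))) : Nat := (st.map itemM).sum

-- Literal port of B's stack loop (head of the list = top of the stack).
def runStack (s : List (String × Int)) (st : List (Sum String (Int × Int))) (res : String) : String :=
  match st with
  | [] => res
  | .inl t :: rest => runStack s rest (res ++ t)
  | .inr (a, b) :: rest =>
    if a == b then runStack s rest (res ++ "M" ++ PySem.Int.toStr b)
    else
      match sGet s (fKey a b) with
      | none => res       -- KeyError in Python; outside Pre_
      | some k =>
        if _h : a ≤ k ∧ k < b then
          runStack s (.inl "(" :: .inr (a, k) :: .inr (k + 1, b) :: .inl ")" :: rest) res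
        else res          -- non-terminating loop in Python; outside Pre_
termination_by stackM st
decreasing_by all_goals (simp only [stackM, itemM, List.map, List.sum_cons]; omega)

def Parenteses_alt (s : List (String × Int)) (i : Int) (j : Int) : String :=
  runStack s [.inr (i, j)] ""

-- ===== PRECONDITION & SPEC =====
-- Pre_ is exactly the domain on which Python A returns: on every subrange the recursion
-- actually reaches, the dict holds an in-range split (a valid split tree over [i,j]).
-- Outside it A raises KeyError (missing "a,b" key) or recurses without bound (split
-- outside [a,b)); Pre_ excludes no input on which A returns a value.  The depth bound
-- d = (j-i).toNat is exact, not a narrowing: every in-range split strictly shrinks the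
-- range, so a returning run of A never recurses deeper than j-i.
def okRange (s : List (String × Int)) : Nat → Int → Int → Bool
  | 0, a, b => a == b
  | d + 1, a, b =>
    if a == b then true
    else
      match sGet s (fKey a b) with
      | none => false
      | some k =>
        if a ≤ k ∧ k < b then okRange s d a k && okRange s d (k + 1) b
        else false

def Pre_Parenteses (s : List (String × Int)) (i : Int) (j : Int) : Prop :=
  okRange s (j - i).toNat i j = true
instance (s : List (String × Int)) (i : Int) (j : Int) : Decidable (Pre_Parenteses s i j) := by
  unfold Pre_Parenteses; infer_instance

def pvWitness_Parenteses : (List (String × Int)) × Int × Int :=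
  ([("0,1", 0)], 0, 1)

def Spec_Parenteses (s : List (String × Int)) (i : Int) (j : Int) (out : String) : Prop := out = Parenteses_alt s i j
instance (s : List (String × Int)) (i : Int) (j : Int) (out : String) : Decidable (Spec_Parenteses s i j out) := by unfold Spec_Parenteses; infer_instance

-- ===== CLAIM (what is proved, stated in full; the proofs are below) =====
def Claim_equal_Parenteses : Prop := ∀ (s : List (String × Int)) (i : Int) (j : Int), Dom_Parenteses s i j → Pre_Parenteses s i j → Spec_Parenteses s i j (Parenteses s i j)

-- ===== LEMMAS AND PROOFS =====

-- equation lemmas for the WF-recursive definitions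
theorem runStack_nil (s : List (String × Int)) (res : String) :
    runStack s [] res = res := by
  rw [runStack]

theorem runStack_tok (s : List (String × Int)) (t : String)
    (rest : List (Sum String (Int × Int))) (res : String) :
    runStack s (.inl t :: rest) res = runStack s rest (res ++ t) := by
  rw [runStack]

theorem runStack_base (s : List (String × Int)) (b : Int)
    (rest : List (Sum String (Int × Int))) (res : String) :
    runStack s (.inr (b, b) :: rest) res = runStack s rest (res ++ "M" ++ PySem.Int.toStr b) := by
  rw [runStack]; simp

theorem runStack_split (s : List (String × Int)) (a b k : Int)
    (hne : a ≠ b) (hk : sGet s (fKey a b) = some k) (hkb : a ≤ k ∧ k < b)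
    (rest : List (Sum String (Int × Int))) (res : String) :
    runStack s (.inr (a, b) :: rest) res =
      runStack s (.inl "(" :: .inr (a, k) :: .inr (k + 1, b) :: .inl ")" :: rest) res := by
  conv_lhs => rw [runStack]
  simp [hne, hk, hkb]

theorem Parenteses_base (s : List (String × Int)) (b : Int) :
    Parenteses s b b = "M" ++ PySem.Int.toStr b := by
  rw [Parenteses]; simp

theorem Parenteses_split (s : List (String × Int)) (a b k : Int)
    (hne : a ≠ b) (hk : sGet s (fKey a b) = some k) (hkb : a ≤ k ∧ k < b) :
    Parenteses s a b = "(" ++ Parenteses s a k ++ Parenteses s (k + 1) b ++ ")" := by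
  conv_lhs => rw [Parenteses]
  simp [hne, hk, hkb]

-- peeling one level off the split-tree predicate
theorem okRange_split (s : List (String × Int)) (d : Nat) (a b k : Int)
    (hne : a ≠ b) (hk : sGet s (fKey a b) = some k) (hkb : a ≤ k ∧ k < b)
    (h : okRange s (d + 1) a b = true) :
    okRange s d a k = true ∧ okRange s d (k + 1) b = true := by
  rw [okRange] at h
  simp [hne, hk, hkb] at h
  exact h

-- processing one returning range item emits exactly A's string for that range
theorem runStack_cons (s : List (String × Int)) (d : Nat) (a b : Int)
    (hok : okRange s d a b = true) (rest : List (Sum String (Int × Int))) (res : String) :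
    runStack s (.inr (a, b) :: rest) res = runStack s rest (res ++ Parenteses s a b) := by
  induction d generalizing a b rest res with
  | zero =>
    rw [okRange] at hok
    have hEq : a = b := by simpa using hok
    subst hEq
    rw [runStack_base, Parenteses_base]
    congr 1
    rw [String.append_assoc]
  | succ d ih =>
    by_cases hEq : a = b
    · subst hEq
      rw [runStack_base, Parenteses_base]
      congr 1
      rw [String.append_assoc]
    · have hok' := hok
      rw [okRange] at hok'
      simp only [hEq, beq_iff_eq, if_false] at hok'
      rcases hk : sGet s (fKey a b) with _ | k
      · rw [hk] at hok'; simp at hok'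
      · rw [hk] at hok'
        by_cases hkb : a ≤ k ∧ k < b
        · obtain ⟨h1, h2⟩ := okRange_split s d a b k hEq hk hkb hok
          rw [runStack_split s a b k hEq hk hkb, runStack_tok,
              ih a k h1, ih (k + 1) b h2,
              runStack_tok, Parenteses_split s a b k hEq hk hkb]
          congr 1
          simp [String.append_assoc]
        · simp [hkb] at hok'

-- ===== VERDICT (by name: the statement is the Claim_ definition above) =====
theorem Parenteses_spec : Claim_equal_Parenteses := by
  intro s i j _ hpre
  unfold Spec_Parenteses Parenteses_alt
  rw [runStack_cons s (j - i).toNat i j hpre [] "", runStack_nil]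
  simp
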